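-- pv_equiv track=rewrite | github.com/DyogoBendo/exercicios-maratona-programacao | eduarda/fase0/bfs.py | press_key
-- ===== SOURCE A (Python) =====
-- def press_key(state, key):
--     new_state = state.copy()
--     new_state[key-1] = 1 - new_state[key-1]  # Inverte o estado da tecla pressionada
--
--     # Verifica as teclas adjacentes e inverte o estado delas se necessário
--     adjacent_keys = {
--         1: [2, 5],
--         2: [1, 3, 5, 6],
--         3: [2, 4, 6, 7],
--         4: [3, 7],
--         5: [1, 2, 6, 8],
--         6: [2, 3, 5, 7, 8, 9],
--         7: [3, 4, 6, 9],
--         8: [5, 6, 9, 10],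
--         9: [6, 7, 8, 10],
--         10: [8, 9]
--     }
--
--     for adjacent_key in adjacent_keys[key]:
--         new_state[adjacent_key-1] = 1 - new_state[adjacent_key-1]
--
--     return new_state
-- ===== SOURCE B (Python) =====
-- def press_key(state, key):
--     adjacent_keys = {
--         1: [2, 5],
--         2: [1, 3, 5, 6],
--         3: [2, 4, 6, 7],
--         4: [3, 7],
--         5: [1, 2, 6, 8],
--         6: [2, 3, 5, 7, 8, 9],
--         7: [3, 4, 6, 9],
--         8: [5, 6, 9, 10],
--         9: [6, 7, 8, 10],
--         10: [8, 9]
--     }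
--     toggles = sorted([key] + adjacent_keys[key])  # distinct 1-based positions, increasing
--     pairs = [(p, 1 - state[p - 1]) for p in toggles]  # (position, new value) for each toggle
--     out = []
--     t = 0
--     for i, x in enumerate(state, start=1):
--         if t < len(pairs) and pairs[t][0] == i:
--             out.append(pairs[t][1])
--             t += 1
--         else:
--             out.append(x)
--     return out
-- ===== Notes on version B (the rewrite author's own statement) =====
-- stated objective: alternative
-- what changed: A copies the whole list and scatter-mutates the pressed and adjacent positions in place by random access; B first computes the sorted (position, new value) pairs for the toggled keys and then builds a fresh output list in a single forward merge pass over the state with a pointer into the pair list (no in-place writes, no random-access writes).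
import Mathlib
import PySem

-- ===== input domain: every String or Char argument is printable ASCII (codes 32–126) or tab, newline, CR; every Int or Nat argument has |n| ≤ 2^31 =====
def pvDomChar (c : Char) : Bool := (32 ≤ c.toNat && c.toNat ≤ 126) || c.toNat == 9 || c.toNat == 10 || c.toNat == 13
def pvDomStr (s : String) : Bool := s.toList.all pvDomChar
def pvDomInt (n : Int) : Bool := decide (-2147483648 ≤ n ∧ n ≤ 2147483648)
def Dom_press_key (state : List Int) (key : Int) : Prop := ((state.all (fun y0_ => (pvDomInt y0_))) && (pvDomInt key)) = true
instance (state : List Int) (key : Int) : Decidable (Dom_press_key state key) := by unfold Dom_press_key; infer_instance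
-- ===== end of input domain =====

-- B replaces A's copy-then-scatter-mutation at random-access positions by precomputing the
-- sorted (position, new value) pairs and building a fresh output in one forward merge pass
-- with a pointer into the pair list; same O(n) cost.

-- ===== PORT A =====
-- the adjacency dict literal both Pythons contain
def pvAdj : PySem.Dict Int (List Int) :=
  PySem.Dict.ofList [(1,[2,5]),(2,[1,3,5,6]),(3,[2,4,6,7]),(4,[3,7]),(5,[1,2,6,8]),
                     (6,[2,3,5,7,8,9]),(7,[3,4,6,9]),(8,[5,6,9,10]),(9,[6,7,8,10]),(10,[8,9])]

-- new_state[i] = 1 - new_state[i]  (Python index assignment; total forms pySetD/pyGetD, exact under Pre_)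
def pvFlip (ns : List Int) (i : Int) : List Int :=
  PySem.List.pySetD ns i (1 - PySem.List.pyGetD ns i 0)

def press_key (state : List Int) (key : Int) : List Int :=
  let ns := pvFlip state (key - 1)
  (pvAdj.getD key []).foldl (fun ns k => pvFlip ns (k - 1)) ns

-- ===== PORT B =====
-- pairs = [(p, 1 - state[p-1]) for p in toggles]  (pyGetD is the total form, exact under Pre_)
def pvPairs (state : List Int) (toggles : List Int) : List (Int × Int) :=
  toggles.map (fun p => (p, 1 - PySem.List.pyGetD state (p - 1) 0))

-- B's for-loop over enumerate(state, 1) with a pointer t into the pair list;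
-- the pointer/list pair (pairs, t) is ported as the remaining suffix of pairs.
def mergeFlip : List (Int × Int) → Int → List Int → List Int
  | _, _, [] => []
  | [], i, x :: xs => x :: mergeFlip [] (i + 1) xs
  | (t, v) :: ps, i, x :: xs =>
      if t = i then v :: mergeFlip ps (i + 1) xs
      else x :: mergeFlip ((t, v) :: ps) (i + 1) xs

-- toggles = sorted([key] + adjacent_keys[key])
def press_key_alt (state : List Int) (key : Int) : List Int :=
  let toggles := PySem.List.sorted (key :: pvAdj.getD key []) (fun x => x) false
  mergeFlip (pvPairs state toggles) 1 state

-- ===== PRECONDITION & SPEC =====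
-- largest 1-based position both Pythons read for each valid key (the key and its adjacents)
def pvNeed (key : Int) : Int :=
  if key = 1 then 5 else if key = 2 then 6 else if key = 3 then 7 else if key = 4 then 7
  else if key = 5 then 8 else if key = 6 then 9 else if key = 7 then 9 else 10

-- A (and B) raises unless key ∈ 1..10 and state reaches every toggled position.
def Pre_press_key (state : List Int) (key : Int) : Prop :=
  1 ≤ key ∧ key ≤ 10 ∧ pvNeed key ≤ (state.length : Int)
instance (state : List Int) (key : Int) : Decidable (Pre_press_key state key) := by
  unfold Pre_press_key; infer_instance

def pvWitness_press_key : List Int × Int := ([1, 0, 0, 1, 0, 0, 1, 0, 1, 0], 6)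

def Spec_press_key (state : List Int) (key : Int) (out : List Int) : Prop := out = press_key_alt state key
instance (state : List Int) (key : Int) (out : List Int) : Decidable (Spec_press_key state key out) := by unfold Spec_press_key; infer_instance

-- ===== CLAIM (what is proved, stated in full; the proofs are below) =====
def Claim_equal_press_key : Prop := ∀ (state : List Int) (key : Int), Dom_press_key state key → Pre_press_key state key → Spec_press_key state key (press_key state key)

-- ===== LEMMAS AND PROOFS =====

-- the flip written with a Nat index (what pvFlip does on a nonnegative index)
def natFlip (ns : List Int) (j : Nat) : List Int := ns.set j (1 - ns.getD j 0)

lemma pvFlip_eq_natFlip (ns : List Int) (i : Int) (h0 : 0 ≤ i) :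
    pvFlip ns i = natFlip ns i.toNat := by
  rw [pvFlip, natFlip, PySem.List.pySetD_of_nonneg ns _ h0,
      PySem.List.pyGetD_of_nonneg ns 0 h0]

lemma length_natFlip (ns : List Int) (j : Nat) : (natFlip ns j).length = ns.length := by
  simp [natFlip]

-- folding flips over distinct positions = one membership pass
lemma foldl_natFlip_eq_mapIdx (idxs : List Nat) (xs : List Int) (nd : idxs.Nodup) :
    idxs.foldl natFlip xs = xs.mapIdx (fun j x => if j ∈ idxs then 1 - x else x) := by
  induction idxs generalizing xs with
  | nil =>
    apply List.ext_getElem <;> simp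
  | cons j rest ih =>
    have hj : j ∉ rest := (List.nodup_cons.mp nd).1
    rw [List.foldl_cons, ih _ (List.nodup_cons.mp nd).2]
    apply List.ext_getElem
    · simp [length_natFlip]
    · intro k hk1 hk2
      simp only [List.getElem_mapIdx] at *
      have hk : k < xs.length := by simpa [length_natFlip] using hk1
      have hget : (natFlip xs j)[k]'(by simpa [length_natFlip] using hk) =
          if j = k then 1 - xs[k] else xs[k] := by
        simp [natFlip, List.getElem_set, List.getD_eq_getElem?_getD]
        split_ifs with h
        · subst h; simp [List.getElem?_eq_getElem hk]
        · rfl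
      by_cases hjk : j = k
      · subst hjk
        simp [hget, hj]
      · have : k ∈ j :: rest ↔ k ∈ rest := by simp [Ne.symm hjk]
        simp [hget, hjk, this]

-- positions shifted to 0-based Nat indices: (j+1) ∈ ks ↔ j ∈ ks.map (a ↦ (a-1).toNat)
lemma mem_shift (ks : List Int) (hpos : ∀ a ∈ ks, 1 ≤ a) (k : Nat) :
    ((k : Int) + 1) ∈ ks ↔ k ∈ ks.map (fun a => (a - 1).toNat) := by
  rw [List.mem_map]
  constructor
  · intro h
    exact ⟨(k : Int) + 1, h, by omega⟩
  · rintro ⟨a, ha, rfl⟩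
    have h1 := hpos a ha
    have h2 : a = (((a - 1).toNat : Nat) : Int) + 1 := by omega
    rw [← h2]; exact ha

-- the merge pass against pairs with strictly increasing positions = one lookup pass
lemma mergeFlip_eq_mapIdx (xs : List Int) (ps : List (Int × Int)) (i : Int)
    (hpw : (ps.map Prod.fst).Pairwise (· < ·)) (hge : ∀ q ∈ ps, i ≤ q.1) :
    mergeFlip ps i xs = xs.mapIdx (fun j x => ((ps.lookup (i + (j : Int))).getD x)) := by
  induction xs generalizing ps i with
  | nil => cases ps <;> simp [mergeFlip]
  | cons x xs ih =>
    cases ps with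
    | nil =>
      rw [show mergeFlip [] i (x :: xs) = x :: mergeFlip [] (i + 1) xs from rfl,
          ih [] (i + 1) (by simp) (by simp), List.mapIdx_cons]
      simp
    | cons q ps' =>
      obtain ⟨t, v⟩ := q
      have hti : i ≤ t := hge (t, v) (by simp)
      have hgt : ∀ u ∈ ps'.map Prod.fst, t < u := (List.pairwise_cons.mp (by simpa using hpw)).1
      by_cases h : t = i
      · have h1 : mergeFlip ((t, v) :: ps') i (x :: xs) = v :: mergeFlip ps' (i + 1) xs := by
          simp [mergeFlip, h]
        have hge' : ∀ q ∈ ps', i + 1 ≤ q.1 := by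
          intro q hq
          have := hgt q.1 (List.mem_map_of_mem hq)
          omega
        rw [h1, ih ps' (i + 1) (List.pairwise_cons.mp (by simpa using hpw)).2 hge',
            List.mapIdx_cons]
        congr 1
        · rw [show i + ((0 : Nat) : Int) = i by simp, List.lookup,
              show (i == t) = true by simp [h], Option.getD_some]
        · have hf : (fun (j : Nat) (y : Int) => ((((t, v) :: ps').lookup (i + (((j + 1 : Nat)) : Int))).getD y))
              = (fun (j : Nat) (y : Int) => ((ps'.lookup ((i + 1) + (j : Int))).getD y)) := by
            funext j y
            have he : i + (((j + 1 : Nat)) : Int) = (i + 1) + (j : Int) := by push_cast; ring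
            have hne : ((i + 1) + (j : Int) == t) = false := by
              have h0 : (0 : Int) ≤ (j : Int) := Int.natCast_nonneg j
              exact beq_eq_false_iff_ne.mpr (by omega)
            rw [he, List.lookup, hne]
          rw [hf]
      · have h1 : mergeFlip ((t, v) :: ps') i (x :: xs) = x :: mergeFlip ((t, v) :: ps') (i + 1) xs := by
          simp [mergeFlip, h]
        have ht : i < t := lt_of_le_of_ne hti (fun e => h e.symm)
        have hge' : ∀ q ∈ (t, v) :: ps', i + 1 ≤ q.1 := by
          intro q hq
          rcases List.mem_cons.mp hq with rfl | hq'
          · omega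
          · have := hgt q.1 (List.mem_map_of_mem hq'); omega
        rw [h1, ih ((t, v) :: ps') (i + 1) hpw hge', List.mapIdx_cons]
        congr 1
        · have hlk : ((t, v) :: ps').lookup i = none := by
            rw [List.lookup, show (i == t) = false from beq_eq_false_iff_ne.mpr (by omega)]
            rw [List.lookup_eq_none_iff]
            intro p hp
            have := hgt p.1 (List.mem_map_of_mem hp)
            exact bne_iff_ne.mpr (by omega)
          simp [hlk]
        · have hf : (fun (j : Nat) (y : Int) => ((((t, v) :: ps').lookup (i + (((j + 1 : Nat)) : Int))).getD y))
              = (fun (j : Nat) (y : Int) => ((((t, v) :: ps').lookup ((i + 1) + (j : Int))).getD y)) := by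
            funext j y
            have he : i + (((j + 1 : Nat)) : Int) = (i + 1) + (j : Int) := by push_cast; ring
            rw [he]
          rw [hf]

-- lookup in pairs built as (p, f p): pure membership
lemma lookup_pvPairs_form (ts : List Int) (f : Int → Int) (a : Int) :
    (ts.map (fun p => (p, f p))).lookup a = if a ∈ ts then some (f a) else none := by
  induction ts with
  | nil => simp
  | cons t ts' ih =>
    by_cases h : t = a
    · subst h
      simp [List.lookup_cons_self]
    · rw [List.map_cons, List.lookup, show (a == t) = false by simp [Ne.symm h], ih]
      simp [Ne.symm h]

-- the generic per-key equality (ks = key :: adjacents, all positive and distinct; ts its sort)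
lemma key_case (state : List Int) (key : Int) (adj ts : List Int)
    (hget : pvAdj.getD key [] = adj)
    (hsort : PySem.List.sorted (key :: adj) (fun x => x) false = ts)
    (hpos : ∀ a ∈ key :: adj, 1 ≤ a) (nd : (key :: adj).Nodup)
    (hpw : ts.Pairwise (· < ·)) :
    press_key state key = press_key_alt state key := by
  have hposts : ∀ t ∈ ts, 1 ≤ t := by
    intro t htm
    exact hpos t (by rw [← hsort] at htm; exact (PySem.List.mem_sorted _ _ _ _).mp htm)
  -- A's copy-and-scatter = one membership pass
  have hA : press_key state key
      = state.mapIdx (fun j x => if j ∈ (key :: adj).map (fun a => (a - 1).toNat) then 1 - x else x) := by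
    rw [press_key, hget]
    have hstep : adj.foldl (fun ns k => pvFlip ns (k - 1)) (pvFlip state (key - 1))
        = (adj.map (fun a => (a - 1).toNat)).foldl natFlip (natFlip state (key - 1).toNat) := by
      rw [pvFlip_eq_natFlip state (key - 1) (by have := hpos key (by simp); omega),
          List.foldl_map]
      exact PySem.List.foldl_congr_mem adj _ _ _
        (fun ns k hk => pvFlip_eq_natFlip ns (k - 1)
          (by have := hpos k (List.mem_cons_of_mem _ hk); omega))
    have ndm : ((key :: adj).map (fun a => (a - 1).toNat)).Nodup := by
      refine List.Nodup.map_on ?_ nd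
      intro x hx y hy hxy
      have hx1 := hpos x hx; have hy1 := hpos y hy
      omega
    calc adj.foldl (fun ns k => pvFlip ns (k - 1)) (pvFlip state (key - 1))
        = ((key :: adj).map (fun a => (a - 1).toNat)).foldl natFlip state := by
          rw [hstep]; rfl
      _ = _ := foldl_natFlip_eq_mapIdx _ _ ndm
  -- B's merge pass = one lookup pass
  have hB : press_key_alt state key
      = state.mapIdx (fun j x => (((pvPairs state ts).lookup ((1 : Int) + (j : Int))).getD x)) := by
    rw [press_key_alt, hget, hsort]
    refine mergeFlip_eq_mapIdx state (pvPairs state ts) 1 ?_ ?_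
    · rw [pvPairs, List.map_map,
          show (Prod.fst ∘ fun p => (p, 1 - PySem.List.pyGetD state (p - 1) 0)) = (fun p : Int => p) from rfl,
          List.map_id']
      exact hpw
    · intro q hq
      rw [pvPairs, List.mem_map] at hq
      obtain ⟨p, hp, rfl⟩ := hq
      exact hposts p hp
  rw [hA, hB]
  apply List.ext_getElem
  · simp
  · intro k hk1 hk2
    simp only [List.getElem_mapIdx]
    have hk : k < state.length := by simpa using hk1
    simp only [pvPairs]
    rw [lookup_pvPairs_form]
    have hiff : ((1 : Int) + (k : Int)) ∈ ts ↔ k ∈ (key :: adj).map (fun a => (a - 1).toNat) := by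
      rw [← hsort, PySem.List.mem_sorted _ _ _ _, show (1 : Int) + (k : Int) = (k : Int) + 1 by ring]
      exact mem_shift (key :: adj) hpos k
    by_cases hm : k ∈ (key :: adj).map (fun a => (a - 1).toNat)
    · rw [if_pos hm, if_pos (hiff.mpr hm)]
      have he : (1 : Int) + (k : Int) - 1 = ((k : Nat) : Int) := by omega
      rw [Option.getD_some, he, PySem.List.pyGetD_natCast, List.getD_eq_getElem?_getD,
          List.getElem?_eq_getElem hk]
      rfl
    · rw [if_neg hm, if_neg (fun hc => hm (hiff.mp hc))]
      rfl

-- ===== VERDICT (by name: the statement is the Claim_ definition above) =====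
theorem press_key_spec : Claim_equal_press_key := by
  intro state key _hdom hpre
  obtain ⟨h1, h2, -⟩ := hpre
  unfold Spec_press_key
  interval_cases key <;>
    exact key_case state _ _ _ rfl rfl (by decide) (by decide) (by decide)
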